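-- pv_equiv track=rewrite | github.com/MrBrantCode/unitest_baseline | mut_generate/mist_train_cf/cf_73888/solution.py | fibonacci_pairs
-- ===== SOURCE A (Python) =====
-- def fibonacci_pairs(numbers):
--     def fibonacci(n):
--         if n <= 0:
--             return 0
--         elif n == 1:
--             return 1
--         else:
--             a, b = 0, 1
--             for _ in range(2, n + 1):
--                 a, b = b, a + b
--             return b
--
--     return [[n, fibonacci(n)] for n in numbers]
-- ===== SOURCE B (Python) =====
-- def fibonacci_pairs(numbers):
--     def fib_pair(n):
--         # returns (F(n), F(n+1)) by fast doubling
--         if n == 0: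
--             return (0, 1)
--         a, b = fib_pair(n >> 1)
--         c = a * (2 * b - a)
--         d = a * a + b * b
--         if n & 1:
--             return (d, c + d)
--         return (c, d)
--
--     def fibonacci(n):
--         if n <= 0:
--             return 0
--         return fib_pair(n)[0]
--
--     return [[n, fibonacci(n)] for n in numbers]
-- ===== Notes on version B (the rewrite author's own statement) =====
-- stated objective: faster
-- what changed: Replaced the linear iterative Fibonacci loop with a fast-doubling recursion computing (F(n), F(n+1)) in O(log n) exact-integer steps; the outer pairing map is unchanged.
import Mathlib
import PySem

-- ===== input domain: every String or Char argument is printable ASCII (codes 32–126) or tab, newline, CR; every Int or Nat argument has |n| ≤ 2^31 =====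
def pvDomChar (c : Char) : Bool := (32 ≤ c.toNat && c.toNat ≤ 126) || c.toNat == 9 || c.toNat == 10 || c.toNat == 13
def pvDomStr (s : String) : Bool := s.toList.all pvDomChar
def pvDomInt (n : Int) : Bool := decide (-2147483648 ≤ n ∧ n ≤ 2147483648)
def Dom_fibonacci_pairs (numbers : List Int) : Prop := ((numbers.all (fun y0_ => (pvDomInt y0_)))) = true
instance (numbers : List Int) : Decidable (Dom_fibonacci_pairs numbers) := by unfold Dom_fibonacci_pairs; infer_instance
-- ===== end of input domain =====

-- B replaces A's linear Fibonacci loop with a fast-doubling recursion (objective: faster, O(log n) per element).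


-- ===== PORT A =====
-- A's inner helper: iterative loop 'a, b = b, a + b' over range(2, n+1)
def pvFibA (n : Int) : Int :=
  if n ≤ 0 then 0
  else if n = 1 then 1
  else
    ((PySem.List.pyRange 2 (n + 1) 1).foldl
      (fun (p : Int × Int) _ => (p.2, p.1 + p.2)) (0, 1)).2

def fibonacci_pairs (numbers : List Int) : List (List Int) :=
  numbers.map (fun n => [n, pvFibA n])

-- ===== PORT B =====
-- B's fast-doubling helper: fib_pair(n) = (F(n), F(n+1)), recursing on n >> 1
def pvFibPair : Nat → Int × Int
  | 0 => (0, 1)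
  | (n + 1) =>
    let p := pvFibPair ((n + 1) / 2)
    let a := p.1
    let b := p.2
    let c := a * (2 * b - a)
    let d := a * a + b * b
    if (n + 1) % 2 = 1 then (d, c + d) else (c, d)
decreasing_by omega

def pvFibB (n : Int) : Int :=
  if n ≤ 0 then 0 else (pvFibPair n.toNat).1

def fibonacci_pairs_alt (numbers : List Int) : List (List Int) :=
  numbers.map (fun n => [n, pvFibB n])

-- ===== PRECONDITION & SPEC =====
def Spec_fibonacci_pairs (numbers : List Int) (out : List (List Int)) : Prop := out = fibonacci_pairs_alt numbers
instance (numbers : List Int) (out : List (List Int)) : Decidable (Spec_fibonacci_pairs numbers out) := by unfold Spec_fibonacci_pairs; infer_instance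

-- ===== CLAIM (what is proved, stated in full; the proofs are below) =====
def Claim_equal_fibonacci_pairs : Prop := ∀ (numbers : List Int), Dom_fibonacci_pairs numbers → Spec_fibonacci_pairs numbers (fibonacci_pairs numbers)

-- ===== LEMMAS AND PROOFS =====

-- fast doubling computes Fibonacci pairs
theorem pvFibPair_eq (n : Nat) :
    pvFibPair n = ((Nat.fib n : Int), (Nat.fib (n + 1) : Int)) := by
  induction n using Nat.strong_induction_on with
  | _ n ih =>
    match n with
    | 0 => simp [pvFibPair]
    | Nat.succ m =>
      rw [pvFibPair]
      have hk : (m + 1) / 2 < m + 1 := by omega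
      rw [ih _ hk]
      set k := (m + 1) / 2 with hkdef
      have hle : Nat.fib k ≤ Nat.fib (k + 1) := Nat.fib_le_fib_succ
      have ca : ((Nat.fib (2 * k) : Int)) =
          (Nat.fib k : Int) * (2 * (Nat.fib (k + 1) : Int) - (Nat.fib k : Int)) := by
        have h2 : Nat.fib k ≤ 2 * Nat.fib (k + 1) := by omega
        rw [Nat.fib_two_mul]
        push_cast [h2]
        ring
      have cb : ((Nat.fib (2 * k + 1) : Int)) =
          (Nat.fib k : Int) * (Nat.fib k : Int) +
            (Nat.fib (k + 1) : Int) * (Nat.fib (k + 1) : Int) := by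
        rw [Nat.fib_two_mul_add_one]
        push_cast
        ring
      have cc : ((Nat.fib (2 * k + 2) : Int)) =
          (Nat.fib (2 * k) : Int) + (Nat.fib (2 * k + 1) : Int) := by
        have := Nat.fib_add_two (n := 2 * k)
        rw [this]
        push_cast
        ring
      by_cases hpar : (m + 1) % 2 = 1
      · have hs : Nat.succ m = 2 * k + 1 := by omega
        rw [if_pos hpar, hs]
        refine Prod.ext ?_ ?_ <;> simp only
        · rw [cb]
        · have e : 2 * k + 1 + 1 = 2 * k + 2 := by ring
          rw [e, cc, ca, cb]
      · have hs : Nat.succ m = 2 * k := by omega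
        rw [if_neg hpar, hs]
        refine Prod.ext ?_ ?_ <;> simp only
        · rw [ca]
        · rw [cb]

-- A's loop from 2 to n computes (F(n-1), F(n))
theorem pvLoopA_eq (n : Nat) (h : 2 ≤ n) :
    (PySem.List.pyRange 2 ((n : Int) + 1) 1).foldl
      (fun (p : Int × Int) _ => (p.2, p.1 + p.2)) (0, 1)
      = ((Nat.fib (n - 1) : Int), (Nat.fib n : Int)) := by
  induction n, h using Nat.le_induction with
  | base => decide
  | succ n hn ih =>
    have hle : (2 : Int) ≤ (n : Int) + 1 := by omega
    have hstep : ((n : Int) + 1 + 1) = ((n : Int) + 1) + 1 := by ring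
    have hr : PySem.List.pyRange 2 ((↑(n + 1) : Int) + 1) 1
        = PySem.List.pyRange 2 ((n : Int) + 1) 1 ++ [(n : Int) + 1] := by
      push_cast
      rw [hstep, PySem.List.pyRange_one_succ_right hle]
    rw [hr, List.foldl_append, ih]
    simp only [List.foldl]
    refine Prod.ext ?_ ?_ <;> simp only
    · have e : n + 1 - 1 = n := by omega
      rw [e]
    · have hf := Nat.fib_add_two (n := n - 1)
      have e1 : n - 1 + 2 = n + 1 := by omega
      have e2 : n - 1 + 1 = n := by omega
      rw [e1, e2] at hf
      rw [hf]
      push_cast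
      ring

theorem pvFib_eq (n : Int) : pvFibA n = pvFibB n := by
  unfold pvFibA pvFibB
  by_cases h0 : n ≤ 0
  · simp [h0]
  · simp only [if_neg h0]
    by_cases h1 : n = 1
    · subst h1
      simp [pvFibPair_eq]
    · simp only [if_neg h1]
      have hpos : 0 < n := by omega
      have h2 : 2 ≤ n.toNat := by omega
      have hc : n = ((n.toNat : Nat) : Int) := by omega
      rw [hc, pvLoopA_eq n.toNat h2, pvFibPair_eq]
      simp
      congr 1
      omega

-- ===== VERDICT (by name: the statement is the Claim_ definition above) =====
theorem fibonacci_pairs_spec : Claim_equal_fibonacci_pairs := by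
  intro numbers _
  unfold Spec_fibonacci_pairs fibonacci_pairs fibonacci_pairs_alt
  exact List.map_congr_left (fun n _ => by rw [pvFib_eq])
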